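-- pv_equiv track=rewrite | github.com/slcloe/Algorithm-Study | 26주차/169199/0823_전영빈.py | solution
-- ===== SOURCE A (Python) =====
-- from collections import deque
--
-- def solution(board):
--     answer = -1
--
--     height = len(board)
--     width = len(board[0])
--     visited = [[False for _ in range(width)] for _ in range(height)]
--     sy, sx = 0, 0
--     for i in range(height):
--         for j in range(width):
--             if board[i][j] == 'R':
--                 sy, sx = i, j
--
--     queue = deque()
--     queue.append((sy, sx, 0))
--     visited[sy][sx] = True
--
--     dy = [-1, 1, 0, 0]
--     dx = [0, 0, -1, 1]
--
--     while queue: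
--         cy, cx, cc = queue.popleft()
--         if board[cy][cx] == 'G':
--             answer = cc
--             break
--
--         for i in range(4):
--             ny, nx = cy, cx
--
--             while True:
--                 ty, tx = ny + dy[i], nx + dx[i]
--                 if 0 <= ty < height and 0 <= tx < width and board[ty][tx] != 'D':
--                     ny, nx = ty, tx
--                 else:
--                     break
--
--             if not visited[ny][nx]:
--                 queue.append((ny, nx, cc+1))
--                 visited[ny][nx] = True
--
--     return answer
-- ===== SOURCE B (Python) =====
-- from collections import deque
--
-- def solution(board):
--     h = len(board)
--     w = len(board[0])
--     # start = last 'R' in row-major order ((0, 0) if none)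
--     rs = [(i, j) for i in range(h) for j in range(w) if board[i][j] == 'R']
--     sy, sx = rs[-1] if rs else (0, 0)
--
--     # directional landing tables via four O(h*w) sweeps:
--     # left[i][j] / right[i][j] = stopping column, up[i][j] / down[i][j] = stopping row
--     left = []
--     for i in range(h):
--         lrow = []
--         for j in range(w):
--             lrow.append(j if j == 0 or board[i][j - 1] == 'D' else lrow[-1])
--         left.append(lrow)
--     right = []
--     for i in range(h):
--         rrow = []
--         for j in range(w - 1, -1, -1):
--             rrow.append(j if j == w - 1 or board[i][j + 1] == 'D' else rrow[-1])
--         rrow.reverse()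
--         right.append(rrow)
--     up = []
--     for i in range(h):
--         up.append([i if i == 0 or board[i - 1][j] == 'D' else up[i - 1][j]
--                    for j in range(w)])
--     down = []
--     for i in range(h - 1, -1, -1):
--         down.append([i if i == h - 1 or board[i + 1][j] == 'D' else down[-1][j]
--                      for j in range(w)])
--     down.reverse()
--
--     visited = [[False] * w for _ in range(h)]
--     visited[sy][sx] = True
--     queue = deque([(sy, sx, 0)])
--     while queue:
--         cy, cx, cc = queue.popleft()
--         if board[cy][cx] == 'G':
--             return cc
--         for ny, nx in ((up[cy][cx], cx), (down[cy][cx], cx),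
--                        (cy, left[cy][cx]), (cy, right[cy][cx])):
--             if not visited[ny][nx]:
--                 queue.append((ny, nx, cc + 1))
--                 visited[ny][nx] = True
--     return -1
-- ===== Notes on version B (the rewrite author's own statement) =====
-- stated objective: alternative
-- what changed: A rescans the board in a while-loop for every BFS transition; B precomputes four directional landing tables with row/column sweeps and finds the start cell via a comprehension, so every BFS transition is a single table lookup.
import Mathlib
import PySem

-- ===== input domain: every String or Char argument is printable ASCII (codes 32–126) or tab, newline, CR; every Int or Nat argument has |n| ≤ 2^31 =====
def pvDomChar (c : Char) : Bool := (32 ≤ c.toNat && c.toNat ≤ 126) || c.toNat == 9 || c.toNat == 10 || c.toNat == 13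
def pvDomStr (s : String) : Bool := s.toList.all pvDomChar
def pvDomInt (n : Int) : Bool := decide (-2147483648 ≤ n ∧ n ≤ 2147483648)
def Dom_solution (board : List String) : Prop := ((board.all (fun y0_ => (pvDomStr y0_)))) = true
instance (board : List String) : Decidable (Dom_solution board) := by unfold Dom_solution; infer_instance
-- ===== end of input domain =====

-- B replaces A's per-move wall-scan (a while loop per BFS edge) by four directional
-- landing tables computed once by row/column sweeps, so each BFS transition is a table
-- lookup (objective: alternative algorithm).

-- shared grid/visited helpers (Python's board[i][j] and visited[i][j] indexing)
def pvAt (g : List (List Char)) (i j : Int) : Char :=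
  PySem.List.pyGetD (PySem.List.pyGetD g i []) j ' '

def pvVGet (v : List (List Bool)) (i j : Int) : Bool :=
  PySem.List.pyGetD (PySem.List.pyGetD v i []) j true

def pvVSet (v : List (List Bool)) (i j : Int) : List (List Bool) :=
  PySem.List.pySetD v i (PySem.List.pySetD (PySem.List.pyGetD v i []) j true)

-- ===== PORT A =====
-- the inner 'while True' slide loop, with fuel h+w (each iteration moves one cell)
def pvSlide (g : List (List Char)) (h w dy dx : Int) : Nat → Int × Int → Int × Int
  | 0, p => p
  | f + 1, (ny, nx) =>
    let ty := ny + dy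
    let tx := nx + dx
    if 0 ≤ ty ∧ ty < h ∧ 0 ≤ tx ∧ tx < w ∧ pvAt g ty tx ≠ 'D' then
      pvSlide g h w dy dx f (ty, tx)
    else (ny, nx)

-- the BFS 'while queue' loop, with fuel h*w+1 (each pop was a first-visit enqueue)
def pvBfsA (g : List (List Char)) (h w : Int) : Nat → List (Int × Int × Int) → List (List Bool) → Int
  | 0, _, _ => -1
  | f + 1, q, vis =>
    match q with
    | [] => -1
    | (cy, cx, cc) :: rest =>
      if pvAt g cy cx = 'G' then cc
      else
        let dy : List Int := [-1, 1, 0, 0]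
        let dx : List Int := [0, 0, -1, 1]
        let s := (PySem.List.pyRange 0 4 1).foldl
          (fun (s : List (Int × Int × Int) × List (List Bool)) i =>
            let p := pvSlide g h w (PySem.List.pyGetD dy i 0) (PySem.List.pyGetD dx i 0)
                       (h + w).toNat (cy, cx)
            if pvVGet s.2 p.1 p.2 then s
            else (s.1 ++ [(p.1, p.2, cc + 1)], pvVSet s.2 p.1 p.2))
          (rest, vis)
        pvBfsA g h w f s.1 s.2

def solution (board : List String) : Int :=
  let g := board.map String.toList
  let height : Int := PySem.List.len board
  let width : Int := PySem.Str.len (PySem.List.pyGetD board 0 "")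
  let st := (PySem.List.pyRange 0 height 1).foldl (fun s i =>
    (PySem.List.pyRange 0 width 1).foldl (fun s j =>
      if pvAt g i j = 'R' then (i, j) else s) s) ((0 : Int), (0 : Int))
  let vis0 := List.replicate height.toNat (List.replicate width.toNat false)
  pvBfsA g height width ((height * width).toNat + 1)
    [(st.1, st.2, 0)] (pvVSet vis0 st.1 st.2)

-- ===== PORT B =====
-- landing-table lookup table[i][j]
def pvTAt (t : List (List Int)) (i j : Int) : Int :=
  PySem.List.pyGetD (PySem.List.pyGetD t i []) j 0

-- BFS with O(1) transitions read from the four precomputed tables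
def pvBfsB (g : List (List Char)) (h w : Int) (upT downT leftT rightT : List (List Int)) :
    Nat → List (Int × Int × Int) → List (List Bool) → Int
  | 0, _, _ => -1
  | f + 1, q, vis =>
    match q with
    | [] => -1
    | (cy, cx, cc) :: rest =>
      if pvAt g cy cx = 'G' then cc
      else
        let cand : List (Int × Int) :=
          [(pvTAt upT cy cx, cx), (pvTAt downT cy cx, cx),
           (cy, pvTAt leftT cy cx), (cy, pvTAt rightT cy cx)]
        let s := cand.foldl
          (fun (s : List (Int × Int × Int) × List (List Bool)) p =>
            if pvVGet s.2 p.1 p.2 then s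
            else (s.1 ++ [(p.1, p.2, cc + 1)], pvVSet s.2 p.1 p.2))
          (rest, vis)
        pvBfsB g h w upT downT leftT rightT f s.1 s.2

def solution_alt (board : List String) : Int :=
  let g := board.map String.toList
  let h : Int := PySem.List.len board
  let w : Int := PySem.Str.len (PySem.List.pyGetD board 0 "")
  let rs := (PySem.List.pyRange 0 h 1).flatMap (fun i =>
    (PySem.List.pyRange 0 w 1).filterMap (fun j =>
      if pvAt g i j = 'R' then some (i, j) else none))
  let st := rs.getLastD (0, 0)
  let leftT := (PySem.List.pyRange 0 h 1).map (fun i =>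
    (PySem.List.pyRange 0 w 1).foldl (fun (lrow : List Int) j =>
      lrow ++ [if j = 0 ∨ pvAt g i (j - 1) = 'D' then j else PySem.List.pyGetD lrow (-1) 0]) [])
  let rightT := (PySem.List.pyRange 0 h 1).map (fun i =>
    ((PySem.List.pyRange (w - 1) (-1) (-1)).foldl (fun (rrow : List Int) j =>
      rrow ++ [if j = w - 1 ∨ pvAt g i (j + 1) = 'D' then j else PySem.List.pyGetD rrow (-1) 0]) []).reverse)
  let upT := (PySem.List.pyRange 0 h 1).foldl (fun (up : List (List Int)) i =>
    up ++ [(PySem.List.pyRange 0 w 1).map (fun j =>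
      if i = 0 ∨ pvAt g (i - 1) j = 'D' then i else pvTAt up (i - 1) j)]) []
  let downT := ((PySem.List.pyRange (h - 1) (-1) (-1)).foldl (fun (down : List (List Int)) i =>
    down ++ [(PySem.List.pyRange 0 w 1).map (fun j =>
      if i = h - 1 ∨ pvAt g (i + 1) j = 'D' then i else pvTAt down (-1) j)]) []).reverse
  let vis0 := List.replicate h.toNat (List.replicate w.toNat false)
  pvBfsB g h w upT downT leftT rightT ((h * w).toNat + 1)
    [(st.1, st.2, 0)] (pvVSet vis0 st.1 st.2)

-- ===== PRECONDITION & SPEC =====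
-- Pre_ is exactly where Python A returns: an empty board, a zero-width first row, or a later
-- row shorter than the first all make A raise IndexError.
def Pre_solution (board : List String) : Prop :=
  board ≠ [] ∧ 0 < PySem.Str.len (board.headD "") ∧
    ∀ s ∈ board, PySem.Str.len (board.headD "") ≤ PySem.Str.len s
instance (board : List String) : Decidable (Pre_solution board) := by
  unfold Pre_solution; infer_instance

def pvWitness_solution : List String := ["R.D", ".DG", "..."]

def Spec_solution (board : List String) (out : Int) : Prop := out = solution_alt board
instance (board : List String) (out : Int) : Decidable (Spec_solution board out) := by
  unfold Spec_solution; infer_instance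

-- ===== CLAIM (what is proved, stated in full; the proofs are below) =====
def Claim_equal_solution : Prop := ∀ (board : List String), Dom_solution board →
  Pre_solution board → Spec_solution board (solution board)

-- ===== LEMMAS AND PROOFS =====

-- pure Nat-level landing functions: characterisations of both the slide loop and the tables
def pvLandL (row : List Char) : Nat → Nat
  | 0 => 0
  | b + 1 => if row.getD b ' ' = 'D' then b + 1 else pvLandL row b

def pvLandR (row : List Char) : Nat → Nat → Nat
  | c, 0 => c
  | c, k + 1 => if row.getD (c + 1) ' ' = 'D' then c else pvLandR row (c + 1) k

def pvLandU (g : List (List Char)) (b : Nat) : Nat → Nat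
  | 0 => 0
  | a + 1 => if (g.getD a []).getD b ' ' = 'D' then a + 1 else pvLandU g b a

def pvLandD (g : List (List Char)) (b : Nat) : Nat → Nat → Nat
  | c, 0 => c
  | c, k + 1 => if (g.getD (c + 1) []).getD b ' ' = 'D' then c else pvLandD g b (c + 1) k

theorem pvLandL_le (row : List Char) : ∀ b, pvLandL row b ≤ b := by
  intro b; induction b with
  | zero => simp [pvLandL]
  | succ b ih => simp only [pvLandL]; split <;> omega

theorem pvLandR_le (row : List Char) : ∀ k c, pvLandR row c k ≤ c + k := by
  intro k; induction k with
  | zero => intro c; simp [pvLandR]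
  | succ k ih =>
    intro c
    simp only [pvLandR]
    split
    · omega
    · have := ih (c + 1); omega

theorem pvLandU_le (g : List (List Char)) (b : Nat) : ∀ a, pvLandU g b a ≤ a := by
  intro a; induction a with
  | zero => simp [pvLandU]
  | succ a ih => simp only [pvLandU]; split <;> omega

theorem pvLandD_le (g : List (List Char)) (b : Nat) : ∀ k c, pvLandD g b c k ≤ c + k := by
  intro k; induction k with
  | zero => intro c; simp [pvLandD]
  | succ k ih =>
    intro c
    simp only [pvLandD]
    split
    · omega
    · have := ih (c + 1); omega

theorem pvAt_natCast (g : List (List Char)) (a b : Nat) :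
    pvAt g (a : Int) (b : Int) = (g.getD a []).getD b ' ' := by
  simp [pvAt]

theorem pvTAt_natCast (t : List (List Int)) (a b : Nat) :
    pvTAt t (a : Int) (b : Int) = (t.getD a []).getD b 0 := by
  simp [pvTAt]

theorem pvSlide_succ (g : List (List Char)) (h w dy dx : Int) (f : Nat) (ny nx : Int) :
    pvSlide g h w dy dx (f + 1) (ny, nx) =
      if 0 ≤ ny + dy ∧ ny + dy < h ∧ 0 ≤ nx + dx ∧ nx + dx < w ∧ pvAt g (ny + dy) (nx + dx) ≠ 'D'
      then pvSlide g h w dy dx f (ny + dy, nx + dx) else (ny, nx) := rfl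

-- ===== slide loop = pure landing function, per direction =====
theorem pvSlideL (g : List (List Char)) (H W : Nat) :
    ∀ (b f : Nat), b ≤ f → ∀ a : Nat, a < H → b < W →
      pvSlide g (H : Int) (W : Int) 0 (-1) f ((a : Int), (b : Int)) =
        ((a : Int), ((pvLandL (g.getD a []) b : Nat) : Int)) := by
  intro b
  induction b with
  | zero =>
    intro f _ a ha hb
    cases f with
    | zero => simp [pvSlide, pvLandL]
    | succ f =>
      rw [pvSlide_succ, if_neg]
      · simp [pvLandL]
      · intro hc; omega
  | succ b ih =>
    intro f hf a ha hb
    obtain ⟨f', rfl⟩ : ∃ f', f = f' + 1 := ⟨f - 1, by omega⟩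
    rw [pvSlide_succ]
    have hty : ((a : Int)) + 0 = (a : Int) := by ring
    have htx : ((b : Nat) + 1 : Nat) + (-1 : Int) = (b : Int) := by push_cast; ring
    by_cases hd : (g.getD a []).getD b ' ' = 'D'
    · rw [if_neg]
      · simp only [pvLandL, if_pos hd]
      · intro hc
        apply hc.2.2.2.2
        rw [hty, htx, pvAt_natCast]; exact hd
    · rw [if_pos]
      · rw [hty, htx, ih f' (by omega) a ha (by omega)]
        simp only [pvLandL, if_neg hd]
      · refine ⟨by omega, by rw [hty]; exact_mod_cast ha, by omega, ?_, ?_⟩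
        · rw [htx]; exact_mod_cast (by omega : b < W)
        · rw [hty, htx, pvAt_natCast]; exact hd

theorem pvSlideR (g : List (List Char)) (H W : Nat) :
    ∀ (k f : Nat), k ≤ f → ∀ a c : Nat, a < H → c < W → k = W - 1 - c →
      pvSlide g (H : Int) (W : Int) 0 1 f ((a : Int), (c : Int)) =
        ((a : Int), ((pvLandR (g.getD a []) c k : Nat) : Int)) := by
  intro k
  induction k with
  | zero =>
    intro f _ a c ha hc hk
    have hcw : c = W - 1 := by omega
    cases f with
    | zero => simp [pvSlide, pvLandR]
    | succ f =>
      rw [pvSlide_succ, if_neg]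
      · simp [pvLandR]
      · intro h; have := h.2.2.2.1; omega
  | succ k ih =>
    intro f hf a c ha hc hk
    obtain ⟨f', rfl⟩ : ∃ f', f = f' + 1 := ⟨f - 1, by omega⟩
    rw [pvSlide_succ]
    have hty : ((a : Int)) + 0 = (a : Int) := by ring
    have htx : ((c : Int)) + 1 = ((c + 1 : Nat) : Int) := by push_cast; ring
    by_cases hd : (g.getD a []).getD (c + 1) ' ' = 'D'
    · rw [if_neg]
      · simp only [pvLandR, if_pos hd]
      · intro h
        apply h.2.2.2.2
        rw [hty, htx, pvAt_natCast]; exact hd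
    · rw [if_pos]
      · rw [hty, htx, ih f' (by omega) a (c + 1) ha (by omega) (by omega)]
        simp only [pvLandR, if_neg hd]
      · refine ⟨by omega, by rw [hty]; exact_mod_cast ha, by omega, ?_, ?_⟩
        · rw [htx]; exact_mod_cast (by omega : c + 1 < W)
        · rw [hty, htx, pvAt_natCast]; exact hd

theorem pvSlideU (g : List (List Char)) (H W : Nat) :
    ∀ (a f : Nat), a ≤ f → ∀ b : Nat, a < H → b < W →
      pvSlide g (H : Int) (W : Int) (-1) 0 f ((a : Int), (b : Int)) =
        (((pvLandU g b a : Nat) : Int), (b : Int)) := by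
  intro a
  induction a with
  | zero =>
    intro f _ b ha hb
    cases f with
    | zero => simp [pvSlide, pvLandU]
    | succ f =>
      rw [pvSlide_succ, if_neg]
      · simp [pvLandU]
      · intro hc; omega
  | succ a ih =>
    intro f hf b ha hb
    obtain ⟨f', rfl⟩ : ∃ f', f = f' + 1 := ⟨f - 1, by omega⟩
    rw [pvSlide_succ]
    have hty : ((a : Nat) + 1 : Nat) + (-1 : Int) = (a : Int) := by push_cast; ring
    have htx : ((b : Int)) + 0 = (b : Int) := by ring
    by_cases hd : (g.getD a []).getD b ' ' = 'D'
    · rw [if_neg]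
      · simp only [pvLandU, if_pos hd]
      · intro hc
        apply hc.2.2.2.2
        rw [hty, htx, pvAt_natCast]; exact hd
    · rw [if_pos]
      · rw [hty, htx, ih f' (by omega) b (by omega) hb]
        simp only [pvLandU, if_neg hd]
      · refine ⟨by omega, ?_, by omega, by rw [htx]; exact_mod_cast hb, ?_⟩
        · rw [hty]; exact_mod_cast (by omega : a < H)
        · rw [hty, htx, pvAt_natCast]; exact hd

theorem pvSlideD (g : List (List Char)) (H W : Nat) :
    ∀ (k f : Nat), k ≤ f → ∀ a b : Nat, a < H → b < W → k = H - 1 - a →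
      pvSlide g (H : Int) (W : Int) 1 0 f ((a : Int), (b : Int)) =
        (((pvLandD g b a k : Nat) : Int), (b : Int)) := by
  intro k
  induction k with
  | zero =>
    intro f _ a b ha hb hk
    have haw : a = H - 1 := by omega
    cases f with
    | zero => simp [pvSlide, pvLandD]
    | succ f =>
      rw [pvSlide_succ, if_neg]
      · simp [pvLandD]
      · intro h; have := h.2.1; omega
  | succ k ih =>
    intro f hf a b ha hb hk
    obtain ⟨f', rfl⟩ : ∃ f', f = f' + 1 := ⟨f - 1, by omega⟩
    rw [pvSlide_succ]
    have hty : ((a : Int)) + 1 = ((a + 1 : Nat) : Int) := by push_cast; ring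
    have htx : ((b : Int)) + 0 = (b : Int) := by ring
    by_cases hd : (g.getD (a + 1) []).getD b ' ' = 'D'
    · rw [if_neg]
      · simp only [pvLandD, if_pos hd]
      · intro h
        apply h.2.2.2.2
        rw [hty, htx, pvAt_natCast]; exact hd
    · rw [if_pos]
      · rw [hty, htx, ih f' (by omega) (a + 1) b (by omega) hb (by omega)]
        simp only [pvLandD, if_neg hd]
      · refine ⟨by omega, ?_, by omega, by rw [htx]; exact_mod_cast hb, ?_⟩
        · rw [hty]; exact_mod_cast (by omega : a + 1 < H)
        · rw [hty, htx, pvAt_natCast]; exact hd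

-- ===== sweep tables = pure landing functions =====
theorem pvRangeW_map {β : Type} (f : Int → β) (W : Nat) :
    (PySem.List.pyRange 0 (W : Int) 1).map f = (List.range W).map (fun b : Nat => f (b : Int)) := by
  rw [PySem.List.pyRange_one, List.map_map]
  have h : ((W : Int) - 0).toNat = W := by omega
  rw [h]
  exact List.map_congr_left (fun k _ => by simp)

theorem pvLeftRow (g : List (List Char)) (a : Nat) : ∀ n : Nat,
    (PySem.List.pyRange 0 (n : Int) 1).foldl (fun (lrow : List Int) j =>
      lrow ++ [if j = 0 ∨ pvAt g (a : Int) (j - 1) = 'D' then j else PySem.List.pyGetD lrow (-1) 0]) []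
    = (List.range n).map (fun b => ((pvLandL (g.getD a []) b : Nat) : Int)) := by
  intro n
  induction n with
  | zero => simp [PySem.List.pyRange_one_eq_nil]
  | succ n ih =>
    have hcast : ((n + 1 : Nat) : Int) = (n : Int) + 1 := by push_cast; ring
    rw [hcast, PySem.List.pyRange_one_succ_right (by positivity), List.foldl_append,
      List.foldl_cons, List.foldl_nil, ih, List.range_succ, List.map_append, List.map_singleton]
    congr 1
    cases n with
    | zero => simp [pvLandL]
    | succ m =>
      have hne : ¬ ((m + 1 : Nat) : Int) = 0 := by push_cast; omega
      have hsub : ((m + 1 : Nat) : Int) - 1 = (m : Int) := by push_cast; ring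
      have hnonempty : (List.range (m + 1)).map
          (fun b => ((pvLandL (g.getD a []) b : Nat) : Int)) ≠ [] := by simp
      rw [PySem.List.pyGetD_neg_one _ _ hnonempty]
      have hlast : ((List.range (m + 1)).map
          (fun b => ((pvLandL (g.getD a []) b : Nat) : Int))).getLast hnonempty
          = ((pvLandL (g.getD a []) m : Nat) : Int) := by
        rw [List.getLast_eq_getElem]; simp
      rw [hlast, hsub, pvAt_natCast]
      by_cases hd : (g.getD a []).getD m ' ' = 'D'
      · rw [if_pos (Or.inr hd)]
        simp only [pvLandL, if_pos hd]
      · rw [if_neg]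
        · simp only [pvLandL, if_neg hd]
        · rintro (h1 | h2)
          · omega
          · exact hd h2

theorem pvRightRowAux (g : List (List Char)) (a W : Nat) : ∀ c : Nat, c < W →
    (PySem.List.pyRange (c : Int) (-1) (-1)).foldl (fun (rrow : List Int) j =>
      rrow ++ [if j = (W : Int) - 1 ∨ pvAt g (a : Int) (j + 1) = 'D' then j
               else PySem.List.pyGetD rrow (-1) 0])
      (((List.range' (c + 1) (W - 1 - c)).map (fun b => ((pvLandR (g.getD a []) b (W - 1 - b) : Nat) : Int))).reverse)
    = ((List.range W).map (fun b => ((pvLandR (g.getD a []) b (W - 1 - b) : Nat) : Int))).reverse := by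
  set FR := fun b : Nat => ((pvLandR (g.getD a []) b (W - 1 - b) : Nat) : Int) with hFR
  have hstep : ∀ c : Nat, c < W →
      ((List.range' (c + 1) (W - 1 - c)).map FR).reverse
        ++ [if (c : Int) = (W : Int) - 1 ∨ pvAt g (a : Int) ((c : Int) + 1) = 'D' then (c : Int)
            else PySem.List.pyGetD (((List.range' (c + 1) (W - 1 - c)).map FR).reverse) (-1) 0]
      = ((List.range' c (W - c)).map FR).reverse := by
    intro c hc
    have hrng : List.range' c (W - c) = c :: List.range' (c + 1) (W - 1 - c) := by
      have : W - c = (W - 1 - c) + 1 := by omega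
      rw [this, List.range'_succ]
    rw [hrng, List.map_cons, List.reverse_cons]
    congr 2
    by_cases hlastcol : c = W - 1
    · rw [if_pos (Or.inl (by omega))]
      have h0 : W - 1 - c = 0 := by omega
      simp [hFR, h0, pvLandR]
    · have hcne : ¬ ((c : Int) = (W : Int) - 1) := by omega
      have h1 : ((c : Int) + 1) = ((c + 1 : Nat) : Int) := by push_cast; ring
      have hlen : W - 1 - c = (W - 1 - (c + 1)) + 1 := by omega
      have hhead : PySem.List.pyGetD (((List.range' (c + 1) (W - 1 - c)).map FR).reverse) (-1) 0
          = FR (c + 1) := by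
        rw [hlen, List.range'_succ, List.map_cons, List.reverse_cons,
          PySem.List.pyGetD_neg_one_append_singleton]
      rw [h1, pvAt_natCast, hhead]
      have hFRc : FR c = if (g.getD a []).getD (c + 1) ' ' = 'D' then (c : Int) else FR (c + 1) := by
        have hk : W - 1 - c = (W - 1 - (c + 1)) + 1 := by omega
        simp only [hFR]
        rw [hk]
        simp only [pvLandR]
        rw [apply_ite (fun n : Nat => (n : Int))]
      rw [hFRc]
      by_cases hd : (g.getD a []).getD (c + 1) ' ' = 'D'
      · rw [if_pos (Or.inr hd), if_pos hd]
      · rw [if_neg, if_neg hd]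
        rintro (h1' | h2)
        · omega
        · exact hd h2
  intro c
  induction c with
  | zero =>
    intro hc
    rw [PySem.List.pyRange_neg_one_cons (by omega),
      PySem.List.pyRange_neg_one_eq_nil (by omega), List.foldl_cons, List.foldl_nil]
    rw [hstep 0 hc]
    congr 2
    rw [Nat.sub_zero, List.range_eq_range']
  | succ c ih =>
    intro hc
    rw [PySem.List.pyRange_neg_one_cons (by omega), List.foldl_cons]
    have h1 : ((c + 1 : Nat) : Int) - 1 = (c : Int) := by push_cast; ring
    rw [h1, hstep (c + 1) hc]
    have hrw : List.range' (c + 1) (W - (c + 1)) = List.range' (c + 1) (W - 1 - c) := by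
      congr 1; omega
    rw [hrw]
    exact ih (by omega)
theorem pvUpAux (g : List (List Char)) (W : Nat) : ∀ n : Nat,
    (PySem.List.pyRange 0 (n : Int) 1).foldl (fun (up : List (List Int)) i =>
      up ++ [(PySem.List.pyRange 0 (W : Int) 1).map (fun j =>
        if i = 0 ∨ pvAt g (i - 1) j = 'D' then i else pvTAt up (i - 1) j)]) []
    = (List.range n).map (fun a : Nat =>
        (List.range W).map (fun b : Nat => ((pvLandU g b a : Nat) : Int))) := by
  intro n
  induction n with
  | zero => simp [PySem.List.pyRange_one_eq_nil]
  | succ n ih =>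
    have hcast : ((n + 1 : Nat) : Int) = (n : Int) + 1 := by push_cast; ring
    rw [hcast, PySem.List.pyRange_one_succ_right (by positivity), List.foldl_append,
      List.foldl_cons, List.foldl_nil, ih, List.range_succ, List.map_append, List.map_singleton]
    congr 1
    congr 1
    rw [pvRangeW_map]
    apply List.map_congr_left
    intro b hb
    have hbW : b < W := List.mem_range.mp hb
    cases n with
    | zero => simp [pvLandU]
    | succ m =>
      have hsub : ((m + 1 : Nat) : Int) - 1 = (m : Int) := by push_cast; ring
      rw [hsub, pvAt_natCast, pvTAt_natCast]
      rw [PySem.List.getD_map_range _ _ _ _ (by omega)]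
      rw [PySem.List.getD_map_range _ _ _ _ hbW]
      by_cases hd : (g.getD m []).getD b ' ' = 'D'
      · rw [if_pos (Or.inr hd)]
        simp only [pvLandU, if_pos hd]
      · rw [if_neg]
        · simp only [pvLandU, if_neg hd]
        · rintro (h1 | h2)
          · omega
          · exact hd h2

theorem pvDownAux (g : List (List Char)) (H W : Nat) : ∀ c : Nat, c < H →
    (PySem.List.pyRange (c : Int) (-1) (-1)).foldl (fun (down : List (List Int)) i =>
      down ++ [(PySem.List.pyRange 0 (W : Int) 1).map (fun j =>
        if i = (H : Int) - 1 ∨ pvAt g (i + 1) j = 'D' then i else pvTAt down (-1) j)])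
      (((List.range' (c + 1) (H - 1 - c)).map (fun a : Nat =>
        (List.range W).map (fun b : Nat => ((pvLandD g b a (H - 1 - a) : Nat) : Int)))).reverse)
    = ((List.range H).map (fun a : Nat =>
        (List.range W).map (fun b : Nat => ((pvLandD g b a (H - 1 - a) : Nat) : Int)))).reverse := by
  set RowD := fun a : Nat => (List.range W).map (fun b : Nat => ((pvLandD g b a (H - 1 - a) : Nat) : Int)) with hRowD
  have hstep : ∀ c : Nat, c < H →
      ((List.range' (c + 1) (H - 1 - c)).map RowD).reverse
        ++ [(PySem.List.pyRange 0 (W : Int) 1).map (fun j =>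
            if (c : Int) = (H : Int) - 1 ∨ pvAt g ((c : Int) + 1) j = 'D' then (c : Int)
            else pvTAt (((List.range' (c + 1) (H - 1 - c)).map RowD).reverse) (-1) j)]
      = ((List.range' c (H - c)).map RowD).reverse := by
    intro c hc
    have hrng : List.range' c (H - c) = c :: List.range' (c + 1) (H - 1 - c) := by
      have : H - c = (H - 1 - c) + 1 := by omega
      rw [this, List.range'_succ]
    rw [hrng, List.map_cons, List.reverse_cons]
    congr 2
    rw [pvRangeW_map]
    simp only [hRowD]
    apply List.map_congr_left
    intro b hb
    have hbW : b < W := List.mem_range.mp hb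
    by_cases hlastrow : c = H - 1
    · rw [if_pos (Or.inl (by omega))]
      have h0 : H - 1 - c = 0 := by omega
      simp [h0, pvLandD]
    · have h1 : ((c : Int) + 1) = ((c + 1 : Nat) : Int) := by push_cast; ring
      have hlen : H - 1 - c = (H - 1 - (c + 1)) + 1 := by omega
      have hhead : pvTAt (((List.range' (c + 1) (H - 1 - c)).map
          (fun a : Nat => (List.range W).map (fun b : Nat => ((pvLandD g b a (H - 1 - a) : Nat) : Int)))).reverse)
          (-1) (b : Int)
          = ((pvLandD g b (c + 1) (H - 1 - (c + 1)) : Nat) : Int) := by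
        simp only [pvTAt]
        rw [hlen, List.range'_succ, List.map_cons, List.reverse_cons,
          PySem.List.pyGetD_neg_one_append_singleton]
        rw [PySem.List.pyGetD_natCast, PySem.List.getD_map_range _ _ _ _ hbW]
      rw [h1, pvAt_natCast, hhead]
      have hLD : ((pvLandD g b c (H - 1 - c) : Nat) : Int)
          = if (g.getD (c + 1) []).getD b ' ' = 'D' then (c : Int)
            else ((pvLandD g b (c + 1) (H - 1 - (c + 1)) : Nat) : Int) := by
        rw [hlen]
        simp only [pvLandD]
        rw [apply_ite (fun n : Nat => (n : Int))]
      rw [hLD]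
      by_cases hd : (g.getD (c + 1) []).getD b ' ' = 'D'
      · rw [if_pos (Or.inr hd), if_pos hd]
      · rw [if_neg, if_neg hd]
        rintro (h1' | h2)
        · omega
        · exact hd h2
  intro c
  induction c with
  | zero =>
    intro hc
    rw [PySem.List.pyRange_neg_one_cons (by omega),
      PySem.List.pyRange_neg_one_eq_nil (by omega), List.foldl_cons, List.foldl_nil]
    rw [hstep 0 hc]
    congr 2
    rw [Nat.sub_zero, List.range_eq_range']
  | succ c ih =>
    intro hc
    rw [PySem.List.pyRange_neg_one_cons (by omega), List.foldl_cons]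
    have h1 : ((c + 1 : Nat) : Int) - 1 = (c : Int) := by push_cast; ring
    rw [h1, hstep (c + 1) hc]
    have hrw : List.range' (c + 1) (H - (c + 1)) = List.range' (c + 1) (H - 1 - c) := by
      congr 1; omega
    rw [hrw]
    exact ih (by omega)
theorem pvTabL (g : List (List Char)) (H W a b : Nat) (ha : a < H) (hb : b < W) :
    pvTAt ((PySem.List.pyRange 0 (H : Int) 1).map (fun i =>
      (PySem.List.pyRange 0 (W : Int) 1).foldl (fun (lrow : List Int) j =>
        lrow ++ [if j = 0 ∨ pvAt g i (j - 1) = 'D' then j else PySem.List.pyGetD lrow (-1) 0]) []))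
      (a : Int) (b : Int) = ((pvLandL (g.getD a []) b : Nat) : Int) := by
  simp only [pvTAt]
  rw [PySem.List.pyGetD_map_pyRange _ H a _ ha, pvLeftRow g a W,
    PySem.List.pyGetD_natCast, PySem.List.getD_map_range _ _ _ _ hb]

theorem pvTabR (g : List (List Char)) (H W a b : Nat) (ha : a < H) (hb : b < W) :
    pvTAt ((PySem.List.pyRange 0 (H : Int) 1).map (fun i =>
      ((PySem.List.pyRange ((W : Int) - 1) (-1) (-1)).foldl (fun (rrow : List Int) j =>
        rrow ++ [if j = (W : Int) - 1 ∨ pvAt g i (j + 1) = 'D' then j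
                 else PySem.List.pyGetD rrow (-1) 0]) []).reverse))
      (a : Int) (b : Int) = ((pvLandR (g.getD a []) b (W - 1 - b) : Nat) : Int) := by
  simp only [pvTAt]
  rw [PySem.List.pyGetD_map_pyRange _ H a _ ha]
  have hW1 : ((W : Int) - 1) = ((W - 1 : Nat) : Int) := by omega
  have haux := pvRightRowAux g a W (W - 1) (by omega)
  rw [show W - 1 - (W - 1) = 0 from by omega, List.range'_zero, List.map_nil,
    List.reverse_nil, ← hW1] at haux
  rw [haux, List.reverse_reverse, PySem.List.pyGetD_natCast,
    PySem.List.getD_map_range _ _ _ _ hb]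
theorem pvTabU (g : List (List Char)) (H W a b : Nat) (ha : a < H) (hb : b < W) :
    pvTAt ((PySem.List.pyRange 0 (H : Int) 1).foldl (fun (up : List (List Int)) i =>
      up ++ [(PySem.List.pyRange 0 (W : Int) 1).map (fun j =>
        if i = 0 ∨ pvAt g (i - 1) j = 'D' then i else pvTAt up (i - 1) j)]) [])
      (a : Int) (b : Int) = ((pvLandU g b a : Nat) : Int) := by
  rw [pvUpAux g W H]
  simp only [pvTAt]
  rw [PySem.List.pyGetD_natCast, PySem.List.pyGetD_natCast,
    PySem.List.getD_map_range _ _ _ _ ha, PySem.List.getD_map_range _ _ _ _ hb]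

theorem pvTabD (g : List (List Char)) (H W a b : Nat) (ha : a < H) (hb : b < W) :
    pvTAt (((PySem.List.pyRange ((H : Int) - 1) (-1) (-1)).foldl (fun (down : List (List Int)) i =>
      down ++ [(PySem.List.pyRange 0 (W : Int) 1).map (fun j =>
        if i = (H : Int) - 1 ∨ pvAt g (i + 1) j = 'D' then i else pvTAt down (-1) j)]) []).reverse)
      (a : Int) (b : Int) = ((pvLandD g b a (H - 1 - a) : Nat) : Int) := by
  have hH1 : ((H : Int) - 1) = ((H - 1 : Nat) : Int) := by omega
  have haux := pvDownAux g H W (H - 1) (by omega)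
  rw [show H - 1 - (H - 1) = 0 from by omega, List.range'_zero, List.map_nil,
    List.reverse_nil, ← hH1] at haux
  rw [haux, List.reverse_reverse]
  simp only [pvTAt]
  rw [PySem.List.pyGetD_natCast, PySem.List.pyGetD_natCast,
    PySem.List.getD_map_range _ _ _ _ ha, PySem.List.getD_map_range _ _ _ _ hb]
theorem pvBfsA_step (g : List (List Char)) (h w : Int) (f : Nat) (cy cx cc : Int)
    (rest : List (Int × Int × Int)) (vis : List (List Bool)) :
    pvBfsA g h w (f + 1) ((cy, cx, cc) :: rest) vis =
      if pvAt g cy cx = 'G' then cc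
      else
        pvBfsA g h w f
          ((PySem.List.pyRange 0 4 1).foldl
            (fun (s : List (Int × Int × Int) × List (List Bool)) i =>
              if pvVGet s.2 (pvSlide g h w (PySem.List.pyGetD [-1, 1, 0, 0] i 0)
                  (PySem.List.pyGetD [0, 0, -1, 1] i 0) (h + w).toNat (cy, cx)).1
                  (pvSlide g h w (PySem.List.pyGetD [-1, 1, 0, 0] i 0)
                  (PySem.List.pyGetD [0, 0, -1, 1] i 0) (h + w).toNat (cy, cx)).2 then s
              else (s.1 ++ [((pvSlide g h w (PySem.List.pyGetD [-1, 1, 0, 0] i 0)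
                  (PySem.List.pyGetD [0, 0, -1, 1] i 0) (h + w).toNat (cy, cx)).1,
                  (pvSlide g h w (PySem.List.pyGetD [-1, 1, 0, 0] i 0)
                  (PySem.List.pyGetD [0, 0, -1, 1] i 0) (h + w).toNat (cy, cx)).2, cc + 1)],
                pvVSet s.2 (pvSlide g h w (PySem.List.pyGetD [-1, 1, 0, 0] i 0)
                  (PySem.List.pyGetD [0, 0, -1, 1] i 0) (h + w).toNat (cy, cx)).1
                  (pvSlide g h w (PySem.List.pyGetD [-1, 1, 0, 0] i 0)
                  (PySem.List.pyGetD [0, 0, -1, 1] i 0) (h + w).toNat (cy, cx)).2))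
            (rest, vis)).1
          ((PySem.List.pyRange 0 4 1).foldl
            (fun (s : List (Int × Int × Int) × List (List Bool)) i =>
              if pvVGet s.2 (pvSlide g h w (PySem.List.pyGetD [-1, 1, 0, 0] i 0)
                  (PySem.List.pyGetD [0, 0, -1, 1] i 0) (h + w).toNat (cy, cx)).1
                  (pvSlide g h w (PySem.List.pyGetD [-1, 1, 0, 0] i 0)
                  (PySem.List.pyGetD [0, 0, -1, 1] i 0) (h + w).toNat (cy, cx)).2 then s
              else (s.1 ++ [((pvSlide g h w (PySem.List.pyGetD [-1, 1, 0, 0] i 0)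
                  (PySem.List.pyGetD [0, 0, -1, 1] i 0) (h + w).toNat (cy, cx)).1,
                  (pvSlide g h w (PySem.List.pyGetD [-1, 1, 0, 0] i 0)
                  (PySem.List.pyGetD [0, 0, -1, 1] i 0) (h + w).toNat (cy, cx)).2, cc + 1)],
                pvVSet s.2 (pvSlide g h w (PySem.List.pyGetD [-1, 1, 0, 0] i 0)
                  (PySem.List.pyGetD [0, 0, -1, 1] i 0) (h + w).toNat (cy, cx)).1
                  (pvSlide g h w (PySem.List.pyGetD [-1, 1, 0, 0] i 0)
                  (PySem.List.pyGetD [0, 0, -1, 1] i 0) (h + w).toNat (cy, cx)).2))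
            (rest, vis)).2 := rfl

theorem pvBfsB_step (g : List (List Char)) (h w : Int) (upT downT leftT rightT : List (List Int))
    (f : Nat) (cy cx cc : Int) (rest : List (Int × Int × Int)) (vis : List (List Bool)) :
    pvBfsB g h w upT downT leftT rightT (f + 1) ((cy, cx, cc) :: rest) vis =
      if pvAt g cy cx = 'G' then cc
      else
        pvBfsB g h w upT downT leftT rightT f
          (([(pvTAt upT cy cx, cx), (pvTAt downT cy cx, cx),
             (cy, pvTAt leftT cy cx), (cy, pvTAt rightT cy cx)].foldl
            (fun (s : List (Int × Int × Int) × List (List Bool)) p =>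
              if pvVGet s.2 p.1 p.2 then s
              else (s.1 ++ [(p.1, p.2, cc + 1)], pvVSet s.2 p.1 p.2))
            (rest, vis)).1)
          (([(pvTAt upT cy cx, cx), (pvTAt downT cy cx, cx),
             (cy, pvTAt leftT cy cx), (cy, pvTAt rightT cy cx)].foldl
            (fun (s : List (Int × Int × Int) × List (List Bool)) p =>
              if pvVGet s.2 p.1 p.2 then s
              else (s.1 ++ [(p.1, p.2, cc + 1)], pvVSet s.2 p.1 p.2))
            (rest, vis)).2) := rfl

theorem pvEnqueueInv (P : Int × Int → Prop) (cc : Int) :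
    ∀ (cand : List (Int × Int)) (q : List (Int × Int × Int)) (vis : List (List Bool)),
      (∀ p ∈ cand, P p) → (∀ e ∈ q, P (e.1, e.2.1)) →
      ∀ e ∈ (cand.foldl (fun (s : List (Int × Int × Int) × List (List Bool)) p =>
          if pvVGet s.2 p.1 p.2 then s
          else (s.1 ++ [(p.1, p.2, cc + 1)], pvVSet s.2 p.1 p.2)) (q, vis)).1,
        P (e.1, e.2.1) := by
  intro cand
  induction cand with
  | nil => intro q vis _ hq e he; exact hq e he
  | cons p cand ih =>
    intro q vis hc hq
    rw [List.foldl_cons]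
    by_cases hv : pvVGet vis p.1 p.2 = true
    · rw [if_pos hv]
      exact ih q vis (fun p' hp' => hc p' (List.mem_cons_of_mem _ hp')) hq
    · rw [if_neg hv]
      refine ih _ _ (fun p' hp' => hc p' (List.mem_cons_of_mem _ hp')) ?_
      intro e' he'
      rcases List.mem_append.mp he' with hmem | hmem
      · exact hq e' hmem
      · rw [List.mem_singleton.mp hmem]
        exact hc p List.mem_cons_self

-- the BFS loops agree once the four slides are the four table lookups
theorem pvBfs_eq (g : List (List Char)) (H W : Nat) (upT downT leftT rightT : List (List Int))
    (hU : ∀ a b : Nat, a < H → b < W → pvTAt upT (a : Int) (b : Int) = ((pvLandU g b a : Nat) : Int))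
    (hD : ∀ a b : Nat, a < H → b < W → pvTAt downT (a : Int) (b : Int) = ((pvLandD g b a (H - 1 - a) : Nat) : Int))
    (hL : ∀ a b : Nat, a < H → b < W → pvTAt leftT (a : Int) (b : Int) = ((pvLandL (g.getD a []) b : Nat) : Int))
    (hR : ∀ a b : Nat, a < H → b < W → pvTAt rightT (a : Int) (b : Int) = ((pvLandR (g.getD a []) b (W - 1 - b) : Nat) : Int)) :
    ∀ (f : Nat) (q : List (Int × Int × Int)) (vis : List (List Bool)),
      (∀ e ∈ q, ∃ a b : Nat, a < H ∧ b < W ∧ e.1 = (a : Int) ∧ e.2.1 = (b : Int)) →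
      pvBfsA g (H : Int) (W : Int) f q vis
        = pvBfsB g (H : Int) (W : Int) upT downT leftT rightT f q vis := by
  intro f
  induction f with
  | zero => intro q vis _; rfl
  | succ f ih =>
    intro q vis hq
    cases q with
    | nil => rfl
    | cons e rest =>
      obtain ⟨cy, cx, cc⟩ := e
      obtain ⟨a, b, ha, hb, hcy, hcx⟩ := hq (cy, cx, cc) List.mem_cons_self
      simp only at hcy hcx
      subst hcy
      subst hcx
      have hfuel : (((H : Int)) + (W : Int)).toNat = H + W := by omega
      have hd0 : PySem.List.pyGetD ([-1, 1, 0, 0] : List Int) 0 0 = -1 := by decide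
      have hd1 : PySem.List.pyGetD ([-1, 1, 0, 0] : List Int) 1 0 = 1 := by decide
      have hd2 : PySem.List.pyGetD ([-1, 1, 0, 0] : List Int) 2 0 = 0 := by decide
      have hd3 : PySem.List.pyGetD ([-1, 1, 0, 0] : List Int) 3 0 = 0 := by decide
      have hx0 : PySem.List.pyGetD ([0, 0, -1, 1] : List Int) 0 0 = 0 := by decide
      have hx1 : PySem.List.pyGetD ([0, 0, -1, 1] : List Int) 1 0 = 0 := by decide
      have hx2 : PySem.List.pyGetD ([0, 0, -1, 1] : List Int) 2 0 = -1 := by decide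
      have hx3 : PySem.List.pyGetD ([0, 0, -1, 1] : List Int) 3 0 = 1 := by decide
      have hr4 : PySem.List.pyRange 0 4 1 = [0, 1, 2, 3] := by decide
      have e1 : pvSlide g (H : Int) (W : Int) (-1) 0 (((H : Int)) + (W : Int)).toNat ((a : Int), (b : Int))
          = (pvTAt upT (a : Int) (b : Int), (b : Int)) := by
        rw [hfuel, pvSlideU g H W a (H + W) (by omega) b ha hb, hU a b ha hb]
      have e2 : pvSlide g (H : Int) (W : Int) 1 0 (((H : Int)) + (W : Int)).toNat ((a : Int), (b : Int))
          = (pvTAt downT (a : Int) (b : Int), (b : Int)) := by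
        rw [hfuel, pvSlideD g H W (H - 1 - a) (H + W) (by omega) a b ha hb rfl, hD a b ha hb]
      have e3 : pvSlide g (H : Int) (W : Int) 0 (-1) (((H : Int)) + (W : Int)).toNat ((a : Int), (b : Int))
          = ((a : Int), pvTAt leftT (a : Int) (b : Int)) := by
        rw [hfuel, pvSlideL g H W b (H + W) (by omega) a ha hb, hL a b ha hb]
      have e4 : pvSlide g (H : Int) (W : Int) 0 1 (((H : Int)) + (W : Int)).toNat ((a : Int), (b : Int))
          = ((a : Int), pvTAt rightT (a : Int) (b : Int)) := by
        rw [hfuel, pvSlideR g H W (W - 1 - b) (H + W) (by omega) a b ha hb rfl, hR a b ha hb]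
      rw [pvBfsA_step, pvBfsB_step]
      by_cases hg : pvAt g (a : Int) (b : Int) = 'G'
      · rw [if_pos hg, if_pos hg]
      · rw [if_neg hg, if_neg hg]
        have hinv : ∀ e ∈ (([(pvTAt upT (a : Int) (b : Int), (b : Int)),
              (pvTAt downT (a : Int) (b : Int), (b : Int)),
              ((a : Int), pvTAt leftT (a : Int) (b : Int)),
              ((a : Int), pvTAt rightT (a : Int) (b : Int))].foldl
            (fun (s : List (Int × Int × Int) × List (List Bool)) p =>
              if pvVGet s.2 p.1 p.2 then s
              else (s.1 ++ [(p.1, p.2, cc + 1)], pvVSet s.2 p.1 p.2))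
            (rest, vis)).1),
            ∃ a' b' : Nat, a' < H ∧ b' < W ∧ e.1 = (a' : Int) ∧ e.2.1 = (b' : Int) := by
          refine pvEnqueueInv
            (fun p => ∃ a' b' : Nat, a' < H ∧ b' < W ∧ p.1 = (a' : Int) ∧ p.2 = (b' : Int))
            cc _ _ _ ?_ ?_
          · intro p hp
            simp only [List.mem_cons, List.not_mem_nil, or_false] at hp
            rcases hp with rfl | rfl | rfl | rfl
            · exact ⟨pvLandU g b a, b, by have := pvLandU_le g b a; omega, hb,
                hU a b ha hb, rfl⟩
            · exact ⟨pvLandD g b a (H - 1 - a), b,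
                by have := pvLandD_le g b (H - 1 - a) a; omega, hb, hD a b ha hb, rfl⟩
            · exact ⟨a, pvLandL (g.getD a []) b, ha,
                by have := pvLandL_le (g.getD a []) b; omega, rfl, hL a b ha hb⟩
            · exact ⟨a, pvLandR (g.getD a []) b (W - 1 - b), ha,
                by have := pvLandR_le (g.getD a []) (W - 1 - b) b; omega, rfl, hR a b ha hb⟩
          · intro e' he'
            exact hq e' (List.mem_cons_of_mem _ he')
        rw [hr4]
        simp only [List.foldl_cons, List.foldl_nil, hd0, hd1, hd2, hd3, hx0, hx1, hx2, hx3,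
          e1, e2, e3, e4] at hinv ⊢
        exact ih _ _ hinv

-- ===== the start-cell scan: A's keep-last fold = B's comprehension + last =====
theorem pvScanInnerFold (g : List (List Char)) (i : Int) (l : List Int) (s : Int × Int) :
    l.foldl (fun s j => if pvAt g i j = 'R' then (i, j) else s) s
      = (l.map (fun j => (i, j))).foldl (fun s p => if pvAt g p.1 p.2 = 'R' then p else s) s := by
  rw [List.foldl_map]

theorem pvKeepLast (g : List (List Char)) :
    ∀ (l : List (Int × Int)) (init : Int × Int),
      l.foldl (fun s p => if pvAt g p.1 p.2 = 'R' then p else s) init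
        = (l.filter (fun p => decide (pvAt g p.1 p.2 = 'R'))).getLastD init := by
  intro l
  induction l with
  | nil => intro init; rfl
  | cons p l ih =>
    intro init
    rw [List.foldl_cons, List.filter_cons]
    by_cases hp : pvAt g p.1 p.2 = 'R'
    · rw [if_pos hp, if_pos (by simp [hp]), List.getLastD_cons, ih p]
    · rw [if_neg hp, if_neg (by simp [hp]), ih init]

theorem pvScanInnerFM (g : List (List Char)) (i : Int) :
    ∀ l : List Int,
      l.filterMap (fun j => if pvAt g i j = 'R' then some (i, j) else none)
        = (l.map (fun j => (i, j))).filter (fun p => decide (pvAt g p.1 p.2 = 'R')) := by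
  intro l
  induction l with
  | nil => rfl
  | cons j l ih =>
    rw [List.filterMap_cons, List.map_cons, List.filter_cons]
    by_cases hj : pvAt g i j = 'R'
    · rw [if_pos hj, if_pos (by simp [hj]), ih]
    · rw [if_neg hj, if_neg (by simp [hj]), ih]

theorem pvScanEq (g : List (List Char)) (h w : Int) :
    (PySem.List.pyRange 0 h 1).foldl (fun s i =>
      (PySem.List.pyRange 0 w 1).foldl (fun s j => if pvAt g i j = 'R' then (i, j) else s) s)
      ((0 : Int), (0 : Int))
    = ((PySem.List.pyRange 0 h 1).flatMap (fun i =>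
        (PySem.List.pyRange 0 w 1).filterMap (fun j =>
          if pvAt g i j = 'R' then some (i, j) else none))).getLastD ((0 : Int), (0 : Int)) := by
  have houter : (fun (s : Int × Int) (i : Int) =>
        (PySem.List.pyRange 0 w 1).foldl (fun s j => if pvAt g i j = 'R' then (i, j) else s) s)
      = fun (s : Int × Int) (i : Int) =>
        ((PySem.List.pyRange 0 w 1).map (fun j => (i, j))).foldl
          (fun s p => if pvAt g p.1 p.2 = 'R' then p else s) s := by
    funext s i
    exact pvScanInnerFold g i _ s
  have hinner : (fun i : Int => (PySem.List.pyRange 0 w 1).filterMap (fun j =>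
        if pvAt g i j = 'R' then some (i, j) else none))
      = fun i : Int => ((PySem.List.pyRange 0 w 1).map (fun j => (i, j))).filter
          (fun p => decide (pvAt g p.1 p.2 = 'R')) := by
    funext i
    exact pvScanInnerFM g i _
  rw [houter, ← List.foldl_flatMap, pvKeepLast g, List.filter_flatMap, hinner]

theorem pvScanBounds (g : List (List Char)) (H W : Nat) (hH : 0 < H) (hW : 0 < W) :
    ∃ a b : Nat, a < H ∧ b < W ∧
      (((PySem.List.pyRange 0 (H : Int) 1).flatMap (fun i =>
        (PySem.List.pyRange 0 (W : Int) 1).filterMap (fun j =>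
          if pvAt g i j = 'R' then some (i, j) else none))).getLastD ((0 : Int), (0 : Int))).1
        = (a : Int) ∧
      (((PySem.List.pyRange 0 (H : Int) 1).flatMap (fun i =>
        (PySem.List.pyRange 0 (W : Int) 1).filterMap (fun j =>
          if pvAt g i j = 'R' then some (i, j) else none))).getLastD ((0 : Int), (0 : Int))).2
        = (b : Int) := by
  set rs := (PySem.List.pyRange 0 (H : Int) 1).flatMap (fun i =>
    (PySem.List.pyRange 0 (W : Int) 1).filterMap (fun j =>
      if pvAt g i j = 'R' then some (i, j) else none)) with hrs
  by_cases hne : rs = []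
  · rw [hne]
    exact ⟨0, 0, hH, hW, rfl, rfl⟩
  · have hmem : rs.getLastD ((0 : Int), (0 : Int)) ∈ rs := by
      rw [List.getLastD_eq_getLast?, List.getLast?_eq_some_getLast hne, Option.getD_some]
      exact List.getLast_mem hne
    rw [hrs] at hmem
    simp only [List.mem_flatMap, List.mem_filterMap] at hmem
    obtain ⟨i, hi, j, hj, hij⟩ := hmem
    by_cases hR : pvAt g i j = 'R'
    · rw [if_pos hR, Option.some_inj] at hij
      have hi' := PySem.List.mem_pyRange_one.mp hi
      have hj' := PySem.List.mem_pyRange_one.mp hj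
      refine ⟨i.toNat, j.toNat, by omega, by omega, ?_, ?_⟩
      · rw [← hij]; simp only; omega
      · rw [← hij]; simp only; omega
    · rw [if_neg hR] at hij
      exact absurd hij (by simp)

-- ===== VERDICT (by name: the statement is the Claim_ definition above) =====
theorem solution_spec : Claim_equal_solution := by
  unfold Claim_equal_solution
  intro board _ hpre
  obtain ⟨hne, hw0, hrows⟩ := hpre
  obtain ⟨r0, rest, rfl⟩ : ∃ r0 rest, board = r0 :: rest := by
    cases board with
    | nil => exact absurd rfl hne
    | cons r0 rest => exact ⟨r0, rest, rfl⟩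
  unfold Spec_solution
  have hW0 : 0 < r0.toList.length := by
    rw [List.headD_cons, PySem.Str.len_eq] at hw0
    exact_mod_cast hw0
  have hlen : PySem.List.len (r0 :: rest) = (((r0 :: rest).length : Nat) : Int) := by
    rw [PySem.List.len_eq]
  have hwid : PySem.Str.len (PySem.List.pyGetD (r0 :: rest) 0 "") = ((r0.toList.length : Nat) : Int) := by
    rw [PySem.List.pyGetD_zero, List.getD_cons_zero, PySem.Str.len_eq]
  simp only [solution, solution_alt]
  rw [hlen, hwid,
    pvScanEq ((r0 :: rest).map String.toList) (((r0 :: rest).length : Nat) : Int)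
      ((r0.toList.length : Nat) : Int)]
  obtain ⟨a, b, ha, hb, hsa, hsb⟩ :=
    pvScanBounds ((r0 :: rest).map String.toList) (r0 :: rest).length r0.toList.length
      (by simp) hW0
  refine pvBfs_eq ((r0 :: rest).map String.toList) (r0 :: rest).length r0.toList.length _ _ _ _
    (fun a' b' ha' hb' => pvTabU _ _ _ a' b' ha' hb')
    (fun a' b' ha' hb' => pvTabD _ _ _ a' b' ha' hb')
    (fun a' b' ha' hb' => pvTabL _ _ _ a' b' ha' hb')
    (fun a' b' ha' hb' => pvTabR _ _ _ a' b' ha' hb')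
    _ _ _ ?_
  intro e he
  simp only [List.mem_singleton] at he
  subst he
  exact ⟨a, b, ha, hb, hsa, hsb⟩
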